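-- pv_equiv track=rewrite | github.com/regnissibnivek/snmp-device-monitor | app.py | build_status_summary
-- ===== SOURCE A (Python) =====
-- def build_status_summary(statuses):
--     """
--     Create a summary of device statuses counting online and offline devices.
--
--     Parameters
--     ----------
--     statuses : list of dict
--         List of device status dictionaries from build_statuses().
--
--     Returns
--     -------
--     dict
--         Dictionary with keys 'online' and 'offline' representing the counts.
--     """
--     summary = {'online': 0, 'offline': 0}
--     for device in statuses:
--         status = device.get('metrics', {}).get('status')
--         if status == 'online':
--             summary['online'] += 1
--         else:
--             summary['offline'] += 1
--     return summary
-- ===== SOURCE B (Python) =====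
-- def build_status_summary(statuses):
--     """Divide-and-conquer: summarize each half and merge the two summaries."""
--     if not statuses:
--         return {'online': 0, 'offline': 0}
--     if len(statuses) == 1:
--         is_on = statuses[0].get('metrics', {}).get('status') == 'online'
--         return {'online': 1 if is_on else 0, 'offline': 0 if is_on else 1}
--     mid = len(statuses) // 2
--     left = build_status_summary(statuses[:mid])
--     right = build_status_summary(statuses[mid:])
--     return {'online': left['online'] + right['online'],
--             'offline': left['offline'] + right['offline']}
-- ===== Notes on version B (the rewrite author's own statement) =====
-- stated objective: alternative
-- what changed: B replaces A's single accumulator loop over two dict counters by a divide-and-conquer recursion: it splits the list in half, summarizes each half recursively (singleton base case) and merges the two summaries by adding their counts.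
import Mathlib
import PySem

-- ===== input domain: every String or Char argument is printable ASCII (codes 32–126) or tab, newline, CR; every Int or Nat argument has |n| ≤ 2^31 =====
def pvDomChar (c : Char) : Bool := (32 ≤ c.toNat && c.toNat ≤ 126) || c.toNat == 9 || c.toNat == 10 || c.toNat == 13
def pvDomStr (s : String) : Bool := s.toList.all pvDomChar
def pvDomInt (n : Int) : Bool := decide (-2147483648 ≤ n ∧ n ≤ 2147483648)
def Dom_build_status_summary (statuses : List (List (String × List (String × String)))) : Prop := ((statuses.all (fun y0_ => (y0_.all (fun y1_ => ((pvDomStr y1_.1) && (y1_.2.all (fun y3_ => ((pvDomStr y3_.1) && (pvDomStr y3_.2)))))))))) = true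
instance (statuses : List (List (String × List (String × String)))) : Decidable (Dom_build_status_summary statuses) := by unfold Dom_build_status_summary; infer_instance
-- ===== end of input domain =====

-- B replaces A's accumulator loop by a divide-and-conquer recursion (split in half,
-- summarize each half, merge by adding counts); objective: alternative decomposition.


-- ===== PORT A =====
-- device.get('metrics', {}).get('status'); List.lookup is first-match, exact for a
-- Python dict rendered as an association list.
def pvStatusOf (device : List (String × List (String × String))) : Option String :=
  ((device.lookup "metrics").getD []).lookup "status"

def build_status_summary (statuses : List (List (String × List (String × String)))) : List (String × Int) :=
  (statuses.foldl
    (fun summary device =>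
      if pvStatusOf device == some "online" then
        summary.modify "online" 0 (· + 1)
      else
        summary.modify "offline" 0 (· + 1))
    (PySem.Dict.ofList [("online", (0 : Int)), ("offline", (0 : Int))])).items

-- ===== PORT B =====
def pvIsOnline (device : List (String × List (String × String))) : Bool :=
  ((device.lookup "metrics").getD []).lookup "status" == some "online"

-- statuses[:mid] / statuses[mid:] with 0 ≤ mid are exactly take/drop
-- (PySem.List.slice_to_natCast / slice_from_natCast); left['online'] etc. is a
-- first-match dict lookup.
def build_status_summary_alt (statuses : List (List (String × List (String × String)))) : List (String × Int) :=
  if statuses.length = 0 then [("online", (0 : Int)), ("offline", (0 : Int))]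
  else if statuses.length = 1 then
    -- Python's local 'is_on' inlined
    [("online", if pvIsOnline (statuses.headD []) then (1 : Int) else 0),
     ("offline", if pvIsOnline (statuses.headD []) then (0 : Int) else 1)]
  else
    let mid := statuses.length / 2
    let left := build_status_summary_alt (statuses.take mid)
    let right := build_status_summary_alt (statuses.drop mid)
    [("online", (left.lookup "online").getD 0 + (right.lookup "online").getD 0),
     ("offline", (left.lookup "offline").getD 0 + (right.lookup "offline").getD 0)]
termination_by statuses.length
decreasing_by
  · simp; omega
  · simp; omega

-- ===== PRECONDITION & SPEC =====
def Spec_build_status_summary (statuses : List (List (String × List (String × String)))) (out : List (String × Int)) : Prop := out = build_status_summary_alt statuses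
instance (statuses : List (List (String × List (String × String)))) (out : List (String × Int)) : Decidable (Spec_build_status_summary statuses out) := by unfold Spec_build_status_summary; infer_instance

-- ===== CLAIM (what is proved, stated in full; the proofs are below) =====
def Claim_equal_build_status_summary : Prop := ∀ (statuses : List (List (String × List (String × String)))), Dom_build_status_summary statuses → Spec_build_status_summary statuses (build_status_summary statuses)

-- ===== LEMMAS AND PROOFS =====

-- Closed form of B: the merge of the halves' summaries counts the online devices and
-- the remaining devices of the whole list.
theorem pv_alt_closed (statuses : List (List (String × List (String × String)))) :
    build_status_summary_alt statuses
      = [("online", (statuses.countP pvIsOnline : Int)),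
         ("offline", ((statuses.length : Int) - statuses.countP pvIsOnline))] := by
  fun_induction build_status_summary_alt statuses with
  | case1 s h => simp [List.length_eq_zero_iff.mp h]
  | case2 s h0 h1 =>
    obtain ⟨d, rfl⟩ : ∃ d, s = [d] := List.length_eq_one_iff.mp h1
    by_cases hd : pvIsOnline d <;> simp [hd]
  | case3 s h0 h1 mid left right ihl ihr =>
    have hsplit : s.countP pvIsOnline
        = (s.take mid).countP pvIsOnline + (s.drop mid).countP pvIsOnline := by
      conv_lhs => rw [← List.take_append_drop mid s]
      rw [List.countP_append]
    have hlen : (s.take mid).length + (s.drop mid).length = s.length := by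
      simp; omega
    simp only [right, left, ihl, ihr]
    simp only [List.lookup, List.cons.injEq, Prod.mk.injEq,
      true_and, and_true]
    rw [hsplit]
    refine ⟨by simp, ?_⟩
    simp only [Option.getD, List.length_take, List.length_drop]
    push_cast
    omega

-- Loop invariant for A's fold over the two-key summary dict.
theorem pv_fold_invariant (statuses : List (List (String × List (String × String)))) :
    ∀ (a b : Int),
    (statuses.foldl
      (fun summary device =>
        if pvStatusOf device == some "online" then
          summary.modify "online" 0 (· + 1)
        else
          summary.modify "offline" 0 (· + 1))
      (PySem.Dict.mk [("online", a), ("offline", b)])).items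
    = [("online", a + statuses.countP pvIsOnline),
       ("offline", b + (statuses.length - statuses.countP pvIsOnline))] := by
  induction statuses with
  | nil => intro a b; simp
  | cons d rest ih =>
    intro a b
    have hstat : pvIsOnline d = (pvStatusOf d == some "online") := rfl
    by_cases h : pvStatusOf d = some "online"
    · have h1 : (PySem.Dict.mk [("online", a), ("offline", b)]).modify "online" 0 (· + 1)
          = PySem.Dict.mk [("online", a + 1), ("offline", b)] := by
        apply PySem.Dict.ext
        simp [PySem.Dict.modify, PySem.Dict.insert, PySem.Dict.getD, PySem.Dict.get?,
              PySem.Dict.contains]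
      simp only [List.foldl_cons, List.countP_cons, List.length_cons, hstat, h,
        beq_self_eq_true, if_pos, h1, ih]
      simp only [List.cons.injEq, Prod.mk.injEq, true_and, and_true]
      push_cast
      omega
    · have h1 : (PySem.Dict.mk [("online", a), ("offline", b)]).modify "offline" 0 (· + 1)
          = PySem.Dict.mk [("online", a), ("offline", b + 1)] := by
        apply PySem.Dict.ext
        simp [PySem.Dict.modify, PySem.Dict.insert, PySem.Dict.getD, PySem.Dict.get?,
              PySem.Dict.contains]
      have hb : (pvStatusOf d == some "online") = false := by simp [h]
      simp only [List.foldl_cons, List.countP_cons, List.length_cons, hstat, hb,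
        Bool.false_eq_true, if_false, h1, ih]
      simp only [List.cons.injEq, Prod.mk.injEq, true_and, and_true]
      push_cast
      omega

-- ===== VERDICT (by name: the statement is the Claim_ definition above) =====
theorem build_status_summary_spec : Claim_equal_build_status_summary := by
  intro statuses _
  unfold Spec_build_status_summary build_status_summary
  rw [pv_alt_closed]
  have hc : statuses.countP pvIsOnline ≤ statuses.length := List.countP_le_length
  have h := pv_fold_invariant statuses 0 0
  simpa [PySem.Dict.ofList, Nat.cast_sub hc] using h
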